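-- pv_equiv track=rewrite | github.com/y0ungc0der/CFRAC | cfrac.py | ExcludeSameElements
-- ===== SOURCE A (Python) =====
-- def ExcludeSameElements(list_elem):
--
--     i = 0
--     while (i < len(list_elem)):
--         val = list_elem[i]
--         count = list_elem.count(val)
--         if (count&1) == 1:
--             count -= 1
--
--         camein = False
--         for j in range(count):
--             list_elem.remove(val)
--             camein = True
--
--         if (camein == True):
--             i -= 1
--         i += 1
--
--     return list_elem
-- ===== SOURCE B (Python) =====
-- def ExcludeSameElements(list_elem):
--     cnt = {}
--     for v in list_elem:
--         cnt[v] = cnt.get(v, 0) + 1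
--     seen = set()
--     out = []
--     for v in reversed(list_elem):
--         if v not in seen:
--             seen.add(v)
--             if cnt[v] % 2 == 1:
--                 out.append(v)
--     out.reverse()
--     list_elem[:] = out
--     return list_elem
-- ===== Notes on version B (the rewrite author's own statement) =====
-- stated objective: faster
-- what changed: A's destructive while loop with repeated list.count/list.remove scans is replaced by one counting pass building a dict of multiplicities plus one reverse pass with a seen-set that keeps the last occurrence of each odd-multiplicity value (then list_elem[:] = out to preserve the in-place mutation).
import Mathlib
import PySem

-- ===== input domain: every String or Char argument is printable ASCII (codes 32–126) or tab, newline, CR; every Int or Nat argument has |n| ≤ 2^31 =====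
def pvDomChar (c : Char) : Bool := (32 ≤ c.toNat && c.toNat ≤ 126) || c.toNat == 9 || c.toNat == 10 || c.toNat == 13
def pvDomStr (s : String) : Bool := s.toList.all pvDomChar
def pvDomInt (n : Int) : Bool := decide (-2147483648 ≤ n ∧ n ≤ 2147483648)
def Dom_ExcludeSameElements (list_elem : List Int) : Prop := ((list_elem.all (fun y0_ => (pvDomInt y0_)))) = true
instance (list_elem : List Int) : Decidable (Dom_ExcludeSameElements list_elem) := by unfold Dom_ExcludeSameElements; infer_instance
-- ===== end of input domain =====

-- B replaces A's quadratic count/remove mutation loop by one counting pass (a dict) plus one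
-- reverse pass with a seen-set (objective: faster, measured). A mutates its
-- argument in place; B's Python assigns list_elem[:] = out, so the final in-place content and the
-- returned object are the same — the theorems below are about the returned value.


-- ===== PORT A =====

def pyRemoveA (l : List Int) (v : Int) : List Int := (PySem.List.remove? l v).getD l

def removeNA : Nat → Int → List Int → List Int
  | 0, _, l => l
  | n + 1, v, l => removeNA n v (pyRemoveA l v)

-- the while loop of A, state (list_elem, i); fuel only makes the recursion structural —
-- list_elem.length + 1 steps always suffice (each iteration shrinks the list or advances i)
def loopA : Nat → List Int → Int → List Int
  | 0, l, _ => l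
  | fuel + 1, l, i =>
    if i < (l.length : Int) then
      let val := (PySem.List.pyGet? l i).getD 0
      let count := PySem.List.count l val
      let count2 := if (count &&& 1) == 1 then count - 1 else count
      let l' := removeNA count2 val l
      let camein := decide (0 < count2)  -- camein = True iff the for loop ran at least once
      let i2 := if camein then i - 1 else i
      loopA fuel l' (i2 + 1)
    else l

def ExcludeSameElements (list_elem : List Int) : List Int := loopA (list_elem.length + 1) list_elem 0

-- ===== PORT B =====
def ExcludeSameElements_alt (list_elem : List Int) : List Int :=
  let cnt := list_elem.foldl (fun d v => d.insert v (d.getD v 0 + 1)) PySem.Dict.empty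
  let st := list_elem.reverse.foldl
    (fun (st : PySem.Set Int × List Int) v =>
      if PySem.Set.contains st.1 v then st
      else (PySem.Set.add st.1 v,
            if PySem.Int.mod (cnt.getD v 0) 2 == 1 then st.2 ++ [v] else st.2))
    (PySem.Set.empty, [])
  st.2.reverse


-- ===== PRECONDITION & SPEC =====
def Spec_ExcludeSameElements (list_elem : List Int) (out : List Int) : Prop := out = ExcludeSameElements_alt list_elem
instance (list_elem : List Int) (out : List Int) : Decidable (Spec_ExcludeSameElements list_elem out) := by unfold Spec_ExcludeSameElements; infer_instance

-- ===== CLAIM (what is proved, stated in full; the proofs are below) =====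
def Claim_equal_ExcludeSameElements : Prop := ∀ (list_elem : List Int), Dom_ExcludeSameElements list_elem → Spec_ExcludeSameElements list_elem (ExcludeSameElements list_elem)

-- ===== LEMMAS AND PROOFS =====

lemma pyRemoveA_length_le (l : List Int) (v : Int) : (pyRemoveA l v).length ≤ l.length := by
  unfold pyRemoveA
  by_cases h : v ∈ l
  · rw [PySem.List.remove?_eq_some_erase l v h]
    simp [h]
  · rw [(PySem.List.remove?_eq_none_iff l v).mpr h]
    simp

lemma removeNA_length_le (n : Nat) (v : Int) (l : List Int) :
    (removeNA n v l).length ≤ l.length := by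
  induction n generalizing l with
  | zero => simp [removeNA]
  | succ n ih => exact le_trans (ih _) (pyRemoveA_length_le l v)

lemma removeNA_length_lt (n : Nat) (v : Int) (l : List Int) (hn : 0 < n) (hv : v ∈ l) :
    (removeNA n v l).length < l.length := by
  cases n with
  | zero => omega
  | succ n =>
    have h1 : (pyRemoveA l v).length < l.length := by
      unfold pyRemoveA
      rw [PySem.List.remove?_eq_some_erase l v hv]
      have h0 : 0 < l.length := List.length_pos_of_mem hv
      simp [hv]
      omega
    calc (removeNA (n+1) v l).length = (removeNA n v (pyRemoveA l v)).length := rfl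
      _ ≤ (pyRemoveA l v).length := removeNA_length_le n v _
      _ < l.length := h1


-- the common characterisation both ports are reduced to: keep the LAST occurrence of each
-- value whose multiplicity in the reference list l is odd, in order of those last occurrences
def G (l : List Int) : List Int → List Int
  | [] => []
  | v :: s => if v ∈ s then G l s else if List.count v l % 2 = 1 then v :: G l s else G l s


lemma pyRemoveA_of_mem {l : List Int} {v : Int} (h : v ∈ l) : pyRemoveA l v = l.erase v := by
  unfold pyRemoveA
  rw [PySem.List.remove?_eq_some_erase l v h]
  rfl

lemma pyRemoveA_of_not_mem {l : List Int} {v : Int} (h : v ∉ l) : pyRemoveA l v = l := by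
  unfold pyRemoveA
  rw [(PySem.List.remove?_eq_none_iff l v).mpr h]
  rfl

lemma count_pyRemoveA_self (l : List Int) (v : Int) :
    List.count v (pyRemoveA l v) = List.count v l - 1 := by
  by_cases h : v ∈ l
  · rw [pyRemoveA_of_mem h, List.count_erase_self]
  · rw [pyRemoveA_of_not_mem h]
    have : List.count v l = 0 := List.count_eq_zero.mpr h
    omega

lemma count_pyRemoveA_of_ne {u v : Int} (hne : u ≠ v) (l : List Int) :
    List.count u (pyRemoveA l v) = List.count u l := by
  by_cases h : v ∈ l
  · rw [pyRemoveA_of_mem h, List.count_erase_of_ne hne]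
  · rw [pyRemoveA_of_not_mem h]

lemma count_removeNA_self (n : Nat) (v : Int) (l : List Int) :
    List.count v (removeNA n v l) = List.count v l - n := by
  induction n generalizing l with
  | zero => simp [removeNA]
  | succ n ih =>
    show List.count v (removeNA n v (pyRemoveA l v)) = _
    rw [ih, count_pyRemoveA_self]
    omega

lemma count_removeNA_of_ne (n : Nat) {u v : Int} (hne : u ≠ v) (l : List Int) :
    List.count u (removeNA n v l) = List.count u l := by
  induction n generalizing l with
  | zero => simp [removeNA]
  | succ n ih =>
    show List.count u (removeNA n v (pyRemoveA l v)) = _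
    rw [ih, count_pyRemoveA_of_ne hne]

lemma pyRemoveA_append {p : List Int} {v : Int} (hp : v ∉ p) (s : List Int) :
    pyRemoveA (p ++ s) v = p ++ pyRemoveA s v := by
  by_cases h : v ∈ s
  · rw [pyRemoveA_of_mem (List.mem_append_right p h), pyRemoveA_of_mem h,
      List.erase_append_right s hp]
  · have : v ∉ p ++ s := by simp [hp, h]
    rw [pyRemoveA_of_not_mem this, pyRemoveA_of_not_mem h]

lemma removeNA_append (n : Nat) {p : List Int} {v : Int} (hp : v ∉ p) (s : List Int) :
    removeNA n v (p ++ s) = p ++ removeNA n v s := by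
  induction n generalizing s with
  | zero => simp [removeNA]
  | succ n ih =>
    show removeNA n v (pyRemoveA (p ++ s) v) = _
    rw [pyRemoveA_append hp, ih]
    rfl

lemma G_congr {l l' : List Int} : ∀ {s : List Int},
    (∀ u ∈ s, List.count u l % 2 = List.count u l' % 2) → G l s = G l' s := by
  intro s
  induction s with
  | nil => intro _; rfl
  | cons w t ih =>
    intro h
    have hw := h w (List.mem_cons_self)
    have ht := ih (fun u hu => h u (List.mem_cons_of_mem _ hu))
    simp only [G]
    rw [ht, hw]

lemma G_erase {l : List Int} {v : Int} : ∀ {s : List Int}, v ∈ s →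
    (2 ≤ List.count v s ∨ List.count v l % 2 = 0) → G l (s.erase v) = G l s := by
  intro s
  induction s with
  | nil => intro h; simp at h
  | cons w t ih =>
    intro hv h2
    by_cases hw : w = v
    · subst hw
      rw [List.erase_cons_head]
      by_cases hvt : w ∈ t
      · simp [G, hvt]
      · have hc : List.count w (w :: t) = 1 := by
          rw [List.count_cons_self, List.count_eq_zero.mpr hvt]
        have hpar : List.count w l % 2 = 0 := by
          rcases h2 with h2 | h2
          · omega
          · exact h2
        have hne1 : ¬ (List.count w l % 2 = 1) := by omega
        simp [G, hvt, hne1]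
    · have hwv : ¬ (w == v) := by simp [hw]
      rw [List.erase_cons_tail (by simp [hw])]
      have hvt : v ∈ t := by
        rcases List.mem_cons.mp hv with h | h
        · exact absurd h.symm hw
        · exact h
      have hcnt : List.count v t = List.count v (w :: t) := by
        simp [hw]
      simp only [G]
      have hmem : (w ∈ t.erase v) ↔ (w ∈ t) := List.mem_erase_of_ne hw
      rw [ih hvt (by omega)]
      simp [hmem]

lemma G_removeNA (l : List Int) (v : Int) : ∀ (n : Nat) (s : List Int),
    n ≤ List.count v s → (n < List.count v s ∨ List.count v l % 2 = 0) →
    G l (removeNA n v s) = G l s := by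
  intro n
  induction n with
  | zero => intro s _ _; rfl
  | succ n ih =>
    intro s hle hcond
    have hv : v ∈ s := List.count_pos_iff.mp (by omega)
    have hstep : pyRemoveA s v = s.erase v := pyRemoveA_of_mem hv
    have hc1 : List.count v (s.erase v) = List.count v s - 1 := List.count_erase_self
    show G l (removeNA n v (pyRemoveA s v)) = G l s
    rw [hstep]
    have h1 : G l (removeNA n v (s.erase v)) = G l (s.erase v) := by
      apply ih
      · omega
      · rcases hcond with h | h
        · left; omega
        · right; exact h
    rw [h1]
    apply G_erase hv
    rcases hcond with h | h
    · left; omega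
    · right; exact h

-- B-side: the reverse pass computes (set of elements, (G l s).reverse)
lemma revpass (l : List Int) (P : Int → Bool)
    (hP : ∀ v, P v = decide (List.count v l % 2 = 1)) : ∀ (s : List Int),
    s.reverse.foldl
      (fun (st : PySem.Set Int × List Int) v =>
        if PySem.Set.contains st.1 v then st
        else (PySem.Set.add st.1 v, if P v then st.2 ++ [v] else st.2))
      (PySem.Set.empty, [])
    = (PySem.Set.ofList s.reverse, (G l s).reverse) := by
  intro s
  induction s with
  | nil => rfl
  | cons w t ih =>
    rw [List.reverse_cons, List.foldl_append, ih]
    simp only [List.foldl_cons, List.foldl_nil]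
    have hmem : (PySem.Set.contains (PySem.Set.ofList t.reverse) w = true) ↔ w ∈ t := by
      rw [PySem.Set.contains_iff, PySem.Set.mem_ofList, List.mem_reverse]
    have hofl : PySem.Set.ofList (t.reverse ++ [w])
        = PySem.Set.add (PySem.Set.ofList t.reverse) w := by
      rw [PySem.Set.ofList_eq_foldl, List.foldl_append, ← PySem.Set.ofList_eq_foldl]
      rfl
    by_cases hw : w ∈ t
    · have hc : PySem.Set.contains (PySem.Set.ofList t.reverse) w = true := hmem.mpr hw
      rw [if_pos hc, hofl]
      have hadd : PySem.Set.add (PySem.Set.ofList t.reverse) w = PySem.Set.ofList t.reverse := by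
        unfold PySem.Set.add
        rw [if_pos hc]
      rw [hadd]
      simp only [G, if_pos hw]
    · have hc : ¬ PySem.Set.contains (PySem.Set.ofList t.reverse) w = true := by
        rw [hmem]; exact hw
      rw [if_neg hc, hofl]
      simp only [G, if_neg hw]
      by_cases hp : List.count w l % 2 = 1
      · rw [hP w, if_pos (by simpa using hp), if_pos hp]
        simp
      · rw [hP w, if_neg (by simpa using hp), if_neg hp]

lemma alt_eq_G (l : List Int) : ExcludeSameElements_alt l = G l l := by
  unfold ExcludeSameElements_alt
  simp only [PySem.Dict.foldl_insert_getD_add_one_eq_counter]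
  have hp : ∀ v, (PySem.Int.mod ((PySem.Dict.counter l).getD v 0) 2 == 1)
      = decide (List.count v l % 2 = 1) := by
    intro v
    rw [PySem.Dict.getD_counter, show (2:Int) = ((2:Nat):Int) from rfl, PySem.Int.mod_natCast]
    have hiff : ((List.count v l % 2 : Nat) : Int) = 1 ↔ List.count v l % 2 = 1 := by omega
    rw [Bool.beq_eq_decide_eq, decide_eq_decide.mpr hiff]
  have h := revpass l (fun v => PySem.Int.mod ((PySem.Dict.counter l).getD v 0) 2 == 1) hp l
  have h2 := congrArg (fun (p : PySem.Set Int × List Int) => p.2.reverse) h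
  simpa using h2

def pvC2 (l : List Int) (i : Int) : Nat :=
  if (PySem.List.count l ((PySem.List.pyGet? l i).getD 0) &&& 1 == 1) = true then
    PySem.List.count l ((PySem.List.pyGet? l i).getD 0) - 1
  else PySem.List.count l ((PySem.List.pyGet? l i).getD 0)

lemma loopA_unfold_pos {l : List Int} {i : Int} {fuel : Nat} (h : i < (l.length : Int)) :
    loopA (fuel + 1) l i =
      loopA fuel (removeNA (pvC2 l i) ((PySem.List.pyGet? l i).getD 0) l)
            ((if decide (0 < pvC2 l i) = true then i - 1 else i) + 1) := by
  rw [loopA, if_pos h]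
  rfl

lemma loopA_unfold_neg {l : List Int} {i : Int} {fuel : Nat} (h : ¬ i < (l.length : Int)) :
    loopA (fuel + 1) l i = l := by
  rw [loopA, if_neg h]

lemma loopA_spec : ∀ (m : Nat) (l : List Int) (i : Int),
    (((l.length : Int) + 1 - i).toNat ≤ m) → 0 ≤ i →
    (∀ v ∈ l.take i.toNat, List.count v l = 1) →
    loopA m l i = l.take i.toNat ++ G l (l.drop i.toNat) := by
  intro m
  induction m with
  | zero =>
    intro l i hm h0 hpref
    show l = _
    have hk : l.length ≤ i.toNat := by omega
    rw [List.take_of_length_le hk, List.drop_of_length_le hk]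
    simp [G]
  | succ m ih =>
    intro l i hm h0 hpref
    by_cases hguard : i < (l.length : Int)
    swap
    · rw [loopA_unfold_neg hguard]
      have hk : l.length ≤ i.toNat := by omega
      rw [List.take_of_length_le hk, List.drop_of_length_le hk]
      simp [G]
    obtain ⟨k, rfl⟩ : ∃ k : Nat, i = (k : Int) := ⟨i.toNat, by omega⟩
    simp only [Int.toNat_natCast] at hpref ⊢
    have hk : k < l.length := by exact_mod_cast hguard
    have hval : (PySem.List.pyGet? l (k : Int)).getD 0 = l[k] := by
      rw [PySem.List.pyGet?_natCast, List.getElem?_eq_getElem hk]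
      rfl
    set v := l[k] with hvdef
    have hdropk : l.drop k = v :: l.drop (k + 1) := List.drop_eq_getElem_cons hk
    have hvdrop : v ∈ l.drop k := by rw [hdropk]; exact List.mem_cons_self
    have hvl : v ∈ l := List.mem_of_mem_drop hvdrop
    have hvtake : v ∉ l.take k := by
      intro hmem
      have h1 := hpref v hmem
      have h2 : List.count v l = List.count v (l.take k) + List.count v (l.drop k) := by
        conv_lhs => rw [← List.take_append_drop k l]
        rw [List.count_append]
      have h3 : 1 ≤ List.count v (l.take k) := List.count_pos_iff.mpr hmem
      have h4 : 1 ≤ List.count v (l.drop k) := List.count_pos_iff.mpr hvdrop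
      omega
    have hcsplit : List.count v l = List.count v (l.drop k) := by
      conv_lhs => rw [← List.take_append_drop k l]
      rw [List.count_append, List.count_eq_zero.mpr hvtake]
      omega
    have hcpos : 1 ≤ List.count v l := List.count_pos_iff.mpr hvl
    set c := List.count v l with hcdef
    have hc2 : pvC2 l (k : Int) = if (c &&& 1 == 1) = true then c - 1 else c := by
      unfold pvC2
      rw [hval, PySem.List.count_eq, ← hcdef]
    set c2 := (if (c &&& 1 == 1) = true then c - 1 else c) with hc2def
    have hc2cases : (c % 2 = 1 ∧ c2 = c - 1) ∨ (c % 2 = 0 ∧ c2 = c) := by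
      rw [hc2def]
      rcases Nat.mod_two_eq_zero_or_one c with hpar | hpar
      · exact Or.inr ⟨hpar, by simp [Nat.and_one_is_mod, hpar]⟩
      · exact Or.inl ⟨hpar, by simp [Nat.and_one_is_mod, hpar]⟩
    rw [loopA_unfold_pos hguard, hc2, hval]
    by_cases hcam : 0 < c2
    · -- removal happened: index stays at k
      rw [if_pos (by simp [hcam])]
      have hstep : (k : Int) - 1 + 1 = (k : Int) := by omega
      rw [hstep]
      have hsplit : removeNA c2 v l = l.take k ++ removeNA c2 v (l.drop k) := by
        conv_lhs => rw [← List.take_append_drop k l]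
        exact removeNA_append c2 hvtake _
      set l' := removeNA c2 v l with hl'def
      have hlen' : l'.length < l.length := removeNA_length_lt c2 v l hcam hvl
      have htakelen : (l.take k).length = k := List.length_take_of_le (le_of_lt hk)
      have htake' : l'.take k = l.take k := by rw [hsplit]; exact List.take_left' htakelen
      have hdrop' : l'.drop k = removeNA c2 v (l.drop k) := by
        rw [hsplit]; exact List.drop_left' htakelen
      have hcount' : ∀ u : Int, u ≠ v → List.count u l' = List.count u l := by
        intro u hu
        rw [hl'def, count_removeNA_of_ne c2 hu]
      have hcountv' : List.count v l' = c - c2 := by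
        rw [hl'def, count_removeNA_self, hcdef]
      have hih := ih l' (k : Int) (by omega) (by omega) ?inv
      case inv =>
        simp only [Int.toNat_natCast, htake']
        intro u hu
        have hune : u ≠ v := fun he => hvtake (he ▸ hu)
        rw [hcount' u hune]
        exact hpref u hu
      rw [hih]
      simp only [Int.toNat_natCast, htake', hdrop']
      congr 1
      -- G l' (removeNA c2 v (l.drop k)) = G l (l.drop k)
      have hg1 : G l' (removeNA c2 v (l.drop k)) = G l (removeNA c2 v (l.drop k)) := by
        apply G_congr
        intro u _
        by_cases hu : u = v
        · subst hu
          rw [hcountv']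
          rcases hc2cases with ⟨hpar, he⟩ | ⟨hpar, he⟩ <;> omega
        · rw [hcount' u hu]
      have hg2 : G l (removeNA c2 v (l.drop k)) = G l (l.drop k) := by
        apply G_removeNA
        · rw [← hcsplit]
          rcases hc2cases with ⟨hpar, he⟩ | ⟨hpar, he⟩ <;> omega
        · rw [← hcsplit]
          rcases hc2cases with ⟨hpar, he⟩ | ⟨hpar, he⟩
          · left; omega
          · right; omega
      rw [hg1, hg2]
    · -- no removal: c2 = 0, so c = 1 and count is odd; index advances
      rw [if_neg (by simp [hcam])]
      have hc1 : c = 1 := by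
        rcases hc2cases with ⟨hpar, he⟩ | ⟨hpar, he⟩ <;> omega
      have hl' : removeNA c2 v l = l := by
        have : c2 = 0 := by omega
        rw [this]
        rfl
      rw [hl']
      have hkc : (k : Int) + 1 = ((k + 1 : Nat) : Int) := by push_cast; ring
      rw [hkc]
      have hih := ih l ((k + 1 : Nat) : Int) (by push_cast; omega) (by omega) ?inv2
      case inv2 =>
        simp only [Int.toNat_natCast]
        intro u hu
        rw [List.take_succ, List.getElem?_eq_getElem hk] at hu
        simp only [Option.toList_some, List.mem_append, List.mem_singleton] at hu
        rcases hu with hu | hu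
        · exact hpref u hu
        · rw [hu, ← hvdef, ← hcdef, hc1]
      rw [hih]
      simp only [Int.toNat_natCast]
      have hvnotdrop : v ∉ l.drop (k + 1) := by
        intro hmem
        have h4 : 1 ≤ List.count v (l.drop (k + 1)) := List.count_pos_iff.mpr hmem
        have h5 : List.count v (l.drop k) = 1 + List.count v (l.drop (k + 1)) := by
          rw [hdropk, List.count_cons_self]
          omega
        omega
      rw [hdropk]
      have hgcons : G l (v :: l.drop (k + 1)) = v :: G l (l.drop (k + 1)) := by
        simp only [G, if_neg hvnotdrop]
        rw [if_pos (by rw [← hcdef, hc1])]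
      have htk : List.take (k + 1) l = List.take k l ++ [v] := by
        rw [List.take_succ, List.getElem?_eq_getElem hk]
        rfl
      rw [hgcons, htk]
      simp

-- ===== VERDICT (by name: the statement is the Claim_ definition above) =====
theorem ExcludeSameElements_spec : Claim_equal_ExcludeSameElements := by
  intro l _
  show ExcludeSameElements l = ExcludeSameElements_alt l
  unfold ExcludeSameElements
  rw [loopA_spec (l.length + 1) l 0 (by omega) (by omega) (by simp)]
  rw [alt_eq_G]
  simp
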